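-- pv_equiv track=rewrite | github.com/cstumps/AOC | AOC-2023/day12.py | findOptions
-- ===== SOURCE A (Python) =====
-- import itertools as it
--
-- def findOptions( pattern, length ):
--     options = []
--
--     groups = len( pattern )
--     blanks = length - sum( pattern ) - groups + 1
--     patternOnes = [ [1] * i for i in pattern ]
--     places = groups + blanks
--
--     # Get the indexes of the groups in the row
--     for p in it.combinations( range( groups + blanks ), groups ):
--         # At this point:
--         #  patternOnes = a list of the correct number of hash marks for the pattern
--         #  p = the indexes where the 1's are supposed to go in the final list
--         opt = [[0]] * places
--
--         # Now sub in each patternOnes at the correct index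
--         for i, po in zip( p, patternOnes ):
--             opt[ i ] = po + [0]
--
--         opt = list( it.chain.from_iterable( opt ) )[ :-1 ]
--
--         options.append( opt )
--
--     return options
-- ===== SOURCE B (Python) =====
-- def findOptions(pattern, length):
--     blanks = length - sum(pattern) - len(pattern) + 1
--     if not pattern:
--         return [[0] * (blanks - 1)]
--     if blanks < 0:
--         return []
--
--     def rec(groups, budget):
--         head, rest = groups[0], groups[1:]
--         out = []
--         for k in range(budget + 1):
--             prefix = [0] * k + [1] * head
--             if rest:
--                 for tail in rec(rest, budget - k):
--                     out.append(prefix + [0] + tail)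
--             else:
--                 out.append(prefix + [0] * (budget - k))
--         return out
--
--     return rec(pattern, blanks)
-- ===== Notes on version B (the rewrite author's own statement) =====
-- stated objective: alternative
-- what changed: Replaces itertools.combinations over slot indexes plus per-combination slot-array substitution and flattening by a direct recursion over the pattern groups that threads a blanks budget, emitting each arrangement's leading zeros, ones-run and separator directly in the same lexicographic order.
import Mathlib
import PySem

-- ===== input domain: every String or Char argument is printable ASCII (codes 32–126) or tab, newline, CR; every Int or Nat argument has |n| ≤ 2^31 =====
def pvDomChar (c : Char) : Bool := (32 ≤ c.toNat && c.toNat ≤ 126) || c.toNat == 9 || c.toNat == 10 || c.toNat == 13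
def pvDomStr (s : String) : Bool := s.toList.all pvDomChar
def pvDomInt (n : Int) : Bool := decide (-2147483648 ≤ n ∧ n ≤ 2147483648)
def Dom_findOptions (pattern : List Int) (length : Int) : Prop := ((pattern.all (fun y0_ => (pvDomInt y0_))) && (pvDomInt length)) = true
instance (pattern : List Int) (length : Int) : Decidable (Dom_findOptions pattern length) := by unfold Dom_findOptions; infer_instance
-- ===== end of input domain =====

-- B replaces A's itertools.combinations-then-substitute construction by a direct recursion
-- over the pattern groups that threads a blanks budget (objective: alternative decomposition).

-- ===== PORT A =====
-- itertools.combinations(l, r) in lexicographic order (standard recursive characterisation)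
def comb : List Int → Nat → List (List Int)
  | _, 0 => [[]]
  | [], _ + 1 => []
  | x :: xs, r + 1 => ((comb xs r).map (fun c => x :: c)) ++ comb xs (r + 1)

-- the inner 'for i, po in zip(p, patternOnes): opt[i] = po + [0]' loop
def assignA (opt : List (List Int)) (ps : List (Int × List Int)) : List (List Int) :=
  ps.foldl (fun o ip => o.set ip.1.toNat (ip.2 ++ [0])) opt

def findOptions (pattern : List Int) (length : Int) : List (List Int) :=
  let groups : Int := pattern.length
  let blanks : Int := length - pattern.sum - groups + 1
  let patternOnes : List (List Int) := pattern.map (fun i => List.replicate i.toNat 1)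
  let places : Int := groups + blanks
  (comb (PySem.List.pyRange 0 (groups + blanks) 1) pattern.length).map (fun p =>
    PySem.List.slice ((assignA (List.replicate places.toNat [0]) (p.zip patternOnes)).flatten)
      none (some (-1)))

-- ===== PORT B =====
def altRec : List Int → Int → List (List Int)
  | [], _ => []       -- rec is never called with an empty group list in Source B
  | h :: rest, budget =>
    (List.range (budget + 1).toNat).flatMap (fun k =>
      let pre := List.replicate k 0 ++ List.replicate h.toNat 1
      if rest.isEmpty then [pre ++ List.replicate (budget - k).toNat 0]
      else (altRec rest (budget - (k : Int))).map (fun tail => pre ++ 0 :: tail))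

def findOptions_alt (pattern : List Int) (length : Int) : List (List Int) :=
  let blanks : Int := length - pattern.sum - pattern.length + 1
  match pattern with
  | [] => [List.replicate (blanks - 1).toNat 0]
  | h :: rest => if blanks < 0 then [] else altRec (h :: rest) blanks

-- ===== PRECONDITION & SPEC =====
def Spec_findOptions (pattern : List Int) (length : Int) (out : List (List Int)) : Prop := out = findOptions_alt pattern length
instance (pattern : List Int) (length : Int) (out : List (List Int)) : Decidable (Spec_findOptions pattern length out) := by unfold Spec_findOptions; infer_instance

-- ===== CLAIM (what is proved, stated in full; the proofs are below) =====
def Claim_equal_findOptions : Prop := ∀ (pattern : List Int) (length : Int), Dom_findOptions pattern length → Spec_findOptions pattern length (findOptions pattern length)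

-- ===== LEMMAS AND PROOFS =====

-- the canonical shape of one assembled arrangement, in slot-relative coordinates:
-- F n ps = flatten of n one-zero slots with the sorted assignments ps substituted in
def F : Int → List (Int × List Int) → List Int
  | n, [] => List.replicate n.toNat 0
  | n, (i, po) :: ps =>
      List.replicate i.toNat 0 ++ po ++ [0] ++
        F (n - i - 1) (ps.map (fun q => (q.1 - i - 1, q.2)))
  termination_by _ ps => ps.length
  decreasing_by simp

theorem comb_short : ∀ (l : List Int) (r : Nat), l.length < r → comb l r = [] := by
  intro l
  induction l with
  | nil =>
    intro r h
    cases r with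
    | zero => simp at h
    | succ r => rfl
  | cons x xs ih =>
    intro r h
    cases r with
    | zero => simp at h
    | succ r =>
      simp only [comb]
      rw [ih r (by simpa using h), ih (r + 1) (by simp at h ⊢; omega)]
      simp

theorem comb_mem : ∀ (l : List Int) (r : Nat) (p : List Int), p ∈ comb l r →
    p.Sublist l ∧ p.length = r := by
  intro l
  induction l with
  | nil =>
    intro r p hp
    cases r with
    | zero => simp [comb] at hp; simp [hp]
    | succ r => simp [comb] at hp
  | cons x xs ih =>
    intro r p hp
    cases r with
    | zero => simp [comb] at hp; simp [hp]
    | succ r =>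
      simp only [comb, List.mem_append, List.mem_map] at hp
      rcases hp with ⟨c, hc, rfl⟩ | hp
      · rcases ih r c hc with ⟨h1, h2⟩
        exact ⟨List.Sublist.cons₂ _ h1, by simp [h2]⟩
      · rcases ih (r + 1) p hp with ⟨h1, h2⟩
        exact ⟨List.Sublist.cons _ h1, h2⟩

theorem comb_map (f : Int → Int) : ∀ (l : List Int) (r : Nat),
    comb (l.map f) r = (comb l r).map (List.map f) := by
  intro l
  induction l with
  | nil =>
    intro r
    cases r with
    | zero => rfl
    | succ r => rfl
  | cons x xs ih =>
    intro r
    cases r with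
    | zero => rfl
    | succ r =>
      simp only [List.map_cons, comb, ih, List.map_append, List.map_map]
      rfl

theorem flatten_replicate_zero : ∀ (m : Nat),
    (List.replicate m ([0] : List Int)).flatten = List.replicate m (0 : Int) := by
  intro m
  induction m with
  | zero => rfl
  | succ m ih => simp [List.replicate_succ, ih]

theorem assign_append : ∀ (ps : List (Int × List Int)) (C l : List (List Int)),
    (∀ q ∈ ps, (C.length : Int) ≤ q.1) →
    assignA (C ++ l) ps = C ++ assignA l (ps.map (fun q => (q.1 - C.length, q.2))) := by
  intro ps
  induction ps with
  | nil => intro C l _; rfl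
  | cons q ps ih =>
    intro C l hle
    have hq : (C.length : Int) ≤ q.1 := hle q (by simp)
    have hset : (C ++ l).set q.1.toNat (q.2 ++ [0]) = C ++ l.set (q.1 - C.length).toNat (q.2 ++ [0]) := by
      rw [List.set_append, if_neg (by omega)]
      congr 1
      congr 1
      omega
    simp only [assignA, List.foldl_cons] at *
    rw [hset, ih C (l.set (q.1 - ↑C.length).toNat (q.2 ++ [0])) (fun r hr => hle r (by simp [hr]))]
    simp

theorem F_eq_aux : ∀ (m : Nat) (ps : List (Int × List Int)) (n : Int), ps.length ≤ m →
    ps.Pairwise (fun a b => a.1 < b.1) →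
    (∀ q ∈ ps, 0 ≤ q.1 ∧ q.1 < n) →
    (assignA (List.replicate n.toNat [0]) ps).flatten = F n ps := by
  intro m
  induction m with
  | zero =>
    intro ps n hm _ _
    have : ps = [] := List.eq_nil_of_length_eq_zero (by omega)
    subst this
    simp only [assignA, List.foldl_nil, F]
    exact flatten_replicate_zero n.toNat
  | succ m ih =>
    intro ps n hm hpw hb
    cases ps with
    | nil =>
      simp only [assignA, List.foldl_nil, F]
      exact flatten_replicate_zero n.toNat
    | cons q ps =>
      obtain ⟨i, po⟩ := q
      have hi0 : 0 ≤ i := (hb (i, po) (by simp)).1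
      have hin : i < n := (hb (i, po) (by simp)).2
      have hlt : ∀ r ∈ ps, i < r.1 := by
        intro r hr
        exact (List.pairwise_cons.mp hpw).1 r hr
      have hset : (List.replicate n.toNat ([0] : List Int)).set i.toNat (po ++ [0])
          = (List.replicate i.toNat ([0] : List Int) ++ [po ++ [0]]) ++ List.replicate (n - i - 1).toNat [0] := by
        rw [List.set_eq_take_append_cons_drop, if_pos (by simp; omega)]
        rw [List.take_replicate, List.drop_replicate]
        simp only [List.append_assoc, List.singleton_append]
        congr 2
        · omega
        · congr 1
          omega
      have hlen : (((List.replicate i.toNat ([0] : List Int) ++ [po ++ [0]])).length : Int) = i + 1 := by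
        simp; omega
      simp only [assignA, List.foldl_cons]
      rw [hset]
      have happ := assign_append ps (List.replicate i.toNat [0] ++ [po ++ [0]])
          (List.replicate (n - i - 1).toNat [0])
          (by intro r hr; rw [hlen]; have := hlt r hr; omega)
      simp only [assignA] at happ
      rw [happ, hlen]
      have hmaps : (ps.map (fun q => (q.1 - (i + 1), q.2))) = (ps.map (fun q => (q.1 - i - 1, q.2))) := by
        apply List.map_congr_left
        intro r _
        simp
        omega
      rw [hmaps]
      have ihx := ih (ps.map (fun q => (q.1 - i - 1, q.2))) (n - i - 1)
        (by simpa using Nat.le_of_succ_le_succ hm)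
        (by
          rw [List.pairwise_map]
          refine (List.pairwise_cons.mp hpw).2.imp ?_
          intro a b hab
          simpa using hab)
        (by
          intro r hr
          simp only [List.mem_map] at hr
          obtain ⟨r0, hr0, rfl⟩ := hr
          have h1 := hlt r0 hr0
          have h2 := (hb r0 (by simp [hr0])).2
          constructor <;> simp <;> omega)
      simp only [assignA] at ihx
      rw [List.flatten_append, ihx]
      simp only [F]
      rw [List.flatten_append, flatten_replicate_zero]
      simp

theorem F_eq (ps : List (Int × List Int)) (n : Int)
    (hpw : ps.Pairwise (fun a b => a.1 < b.1))
    (hb : ∀ q ∈ ps, 0 ≤ q.1 ∧ q.1 < n) :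
    (assignA (List.replicate n.toNat [0]) ps).flatten = F n ps :=
  F_eq_aux ps.length ps n le_rfl hpw hb

theorem F_ne_nil (n : Int) (i : Int) (po : List Int) (ps : List (Int × List Int)) :
    F n ((i, po) :: ps) ≠ [] := by
  simp [F]

theorem F_shift (n i : Int) (po : List Int) (ps : List (Int × List Int)) (hi : 0 ≤ i) :
    F n (((i, po) :: ps).map (fun x => (x.1 + 1, x.2))) = 0 :: F (n - 1) ((i, po) :: ps) := by
  simp only [List.map_cons, F, List.map_map]
  have h1 : (i + 1).toNat = i.toNat + 1 := by omega
  rw [h1, List.replicate_succ]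
  have h2 : n - (i + 1) - 1 = n - 1 - i - 1 := by ring
  rw [h2]
  have h3 : ((ps.map (fun x => (x.1 + 1, x.2))).map (fun q => (q.1 - (i + 1) - 1, q.2)))
      = ps.map (fun q => (q.1 - i - 1, q.2)) := by
    rw [List.map_map]
    apply List.map_congr_left
    intro r _
    simp
  rw [List.map_map] at h3
  rw [h3]
  simp

-- peel the k = 0 gap off altRec: remaining arrangements are those with budget b-1, shifted by one 0
theorem altRec_step (h : Int) (rest : List Int) (b : Int) (hb : 0 ≤ b) :
    altRec (h :: rest) b =
      (if rest.isEmpty then [List.replicate h.toNat 1 ++ List.replicate b.toNat 0]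
       else (altRec rest b).map (fun tl => List.replicate h.toNat 1 ++ 0 :: tl))
      ++ (altRec (h :: rest) (b - 1)).map (fun l => 0 :: l) := by
  conv_lhs => rw [altRec]
  conv_rhs => rw [altRec]
  have h1 : (b + 1).toNat = b.toNat + 1 := by omega
  have h2 : (b - 1 + 1).toNat = b.toNat := by omega
  rw [h1, h2, List.range_succ_eq_map, List.flatMap_cons, List.flatMap_map, List.map_flatMap]
  congr 1
  · simp
  · apply List.flatMap_congr
    intro k _
    have h3 : b - (↑(Nat.succ k) : Int) = b - 1 - ↑k := by push_cast; ring
    by_cases hr : rest.isEmpty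
    · simp only [hr, if_true, List.map_cons]
      rw [h3]
      simp [List.replicate_succ]
    · simp only [hr, Bool.false_eq_true, if_false, List.map_map]
      rw [h3]
      apply List.map_congr_left
      intro tl _
      simp [List.replicate_succ]

-- main correspondence: combinations + substitution = gap recursion
theorem main_lemma : ∀ (m : Nat) (pat : List Int) (b : Int), pat ≠ [] → 0 ≤ b →
    pat.length + b.toNat ≤ m →
    (comb ((List.range (pat.length + b.toNat)).map (fun k : Nat => (k : Int))) pat.length).map
      (fun p => (F ((pat.length : Int) + b) (p.zip (pat.map (fun i => List.replicate i.toNat 1)))).dropLast)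
      = altRec pat b := by
  intro m
  induction m with
  | zero =>
    intro pat b hne hb hm
    cases pat with
    | nil => exact absurd rfl hne
    | cons h t => simp at hm
  | succ m ih =>
    intro pat b hne hb hm
    cases pat with
    | nil => exact absurd rfl hne
    | cons h t =>
      -- abbreviations
      have hk : (h :: t).length + b.toNat = (t.length + b.toNat) + 1 := by simp; omega
      rw [hk, List.range_succ_eq_map]
      rw [show (List.map (fun k : Nat => (k : Int)) (0 :: List.map Nat.succ (List.range (t.length + b.toNat))))
          = (0 : Int) :: List.map (fun k : Nat => (k : Int)) (List.map Nat.succ (List.range (t.length + b.toNat))) from by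
        simp]
      have hL : (List.map Nat.succ (List.range (t.length + b.toNat))).map (fun j : Nat => (j : Int))
          = ((List.range (t.length + b.toNat)).map (fun j : Nat => (j : Int))).map (fun x => x + 1) := by
        rw [List.map_map, List.map_map]
        apply List.map_congr_left
        intro j _
        simp [Nat.succ_eq_add_one]
      rw [hL]
      simp only [List.length_cons, comb, List.map_append]
      rw [comb_map (fun x => x + 1), comb_map (fun x => x + 1)]
      rw [altRec_step h t b hb]
      have hR : ∀ x ∈ (List.range (t.length + b.toNat)).map (fun j : Nat => (j : Int)), 0 ≤ x := by
        intro x hx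
        simp only [List.mem_map] at hx
        obtain ⟨j, _, rfl⟩ := hx
        positivity
      congr 1
      · -- part 1: combinations whose first chosen index is 0
        cases t with
        | nil =>
          have hc0 : ∀ X : List Int, comb X 0 = [[]] := fun X => by cases X <;> rfl
          have hc0' : comb ((List.range (([] : List Int).length + b.toNat)).map (fun j : Nat => (j : Int)))
              ([] : List Int).length = [[]] := hc0 _
          rw [hc0']
          simp only [List.map_cons, List.map_nil, List.isEmpty_nil, if_true, List.zip_cons_cons,
            List.zip_nil_right, F]
          have harg : ((([] : List Int).length + 1 : Nat) : Int) + b - 0 - 1 = b := by simp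
          rw [harg]
          simp only [Int.toNat_zero, List.replicate, List.nil_append]
          rw [List.append_assoc, List.singleton_append, ← List.replicate_succ,
            List.replicate_succ', ← List.append_assoc, List.dropLast_concat]
        | cons t0 t1 =>
          have hIH := ih (t0 :: t1) b (by simp) hb (by simp at hm ⊢; omega)
          simp only [List.isEmpty_cons, Bool.false_eq_true, if_false]
          rw [← hIH]
          simp only [List.map_map]
          apply List.map_congr_left
          intro q hq
          obtain ⟨hsub, hlen⟩ := comb_mem _ _ q hq
          simp only [Function.comp_apply, List.map_cons, List.zip_cons_cons]
          -- F on the (0, ones h) head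
          rw [show ((((t0 :: t1).length + 1 : Nat) : Int) + b) = ((List.length (t0 :: t1) : Int) + b) + 1 by push_cast; ring]
          rw [F]
          have hzl : ((q.map (fun x => x + 1)).zip ((List.replicate t0.toNat (1 : Int) :: t1.map (fun i => List.replicate i.toNat 1)))).map
                (fun r => (r.1 - 0 - 1, r.2))
              = q.zip ((List.replicate t0.toNat (1 : Int) :: t1.map (fun i => List.replicate i.toNat 1))) := by
            rw [List.zip_map_left, List.map_map]
            have : ∀ r ∈ q.zip ((List.replicate t0.toNat (1 : Int) :: t1.map (fun i => List.replicate i.toNat 1))),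
                ((fun r => (r.1 - 0 - 1, r.2)) ∘ Prod.map (fun x : Int => x + 1) id) r = id r := by
              intro r _
              simp [Prod.map]
            rw [List.map_congr_left this, List.map_id]
          rw [hzl]
          have hq_ne : q ≠ [] := by
            intro hq0
            subst hq0
            simp at hlen
          obtain ⟨i, q', rfl⟩ : ∃ i q', q = i :: q' := by
            cases q with
            | nil => exact absurd rfl hq_ne
            | cons a as => exact ⟨a, as, rfl⟩
          have hFne : F ((List.length (t0 :: t1) : Int) + b)
              ((i :: q').zip ((List.replicate t0.toNat (1 : Int) :: t1.map (fun i => List.replicate i.toNat 1)))) ≠ [] := by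
            simp only [List.zip_cons_cons]
            exact F_ne_nil _ _ _ _
          rw [show (((List.length (t0 :: t1) : Int) + b) + 1 - 0 - 1) = (List.length (t0 :: t1) : Int) + b by ring]
          simp only [Int.toNat_zero, List.replicate, List.nil_append]
          rw [List.append_assoc, List.singleton_append,
            List.dropLast_append, List.dropLast_cons_of_ne_nil hFne]
          simp
      · -- part 2: combinations avoiding index 0, shifted by one
        by_cases hb0 : b = 0
        · subst hb0
          have hshort : comb ((List.range (t.length + (0 : Int).toNat)).map (fun j : Nat => (j : Int)))
              (t.length + 1) = [] := by
            apply comb_short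
            simp
          rw [hshort]
          have hneg : altRec (h :: t) (0 - 1) = [] := by
            rw [altRec]
            norm_num
          rw [hneg]
          simp
        · have hb1 : (1 : Int) ≤ b := by omega
          have hIH := ih (h :: t) (b - 1) (by simp) (by omega) (by simp at hm ⊢; omega)
          have hkeq : (h :: t).length + (b - 1).toNat = t.length + b.toNat := by
            simp
            omega
          rw [hkeq] at hIH
          simp only [List.length_cons] at hIH
          rw [← hIH]
          simp only [List.map_map]
          apply List.map_congr_left
          intro q hq
          obtain ⟨hsub, hlen⟩ := comb_mem _ _ q hq
          obtain ⟨i, q', rfl⟩ : ∃ i q', q = i :: q' := by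
            cases q with
            | nil => simp at hlen
            | cons a as => exact ⟨a, as, rfl⟩
          have hi0 : (0 : Int) ≤ i := hR i (hsub.subset (by simp))
          simp only [Function.comp_apply, List.map_cons, List.zip_cons_cons]
          have hshift : (((i + 1, List.replicate h.toNat (1 : Int)) :: (q'.map (fun x => x + 1)).zip (t.map (fun i => List.replicate i.toNat (1 : Int)))) : List (Int × List Int))
              = (((i, List.replicate h.toNat (1 : Int)) :: q'.zip (t.map (fun i => List.replicate i.toNat (1 : Int)))).map
                  (fun x => (x.1 + 1, x.2))) := by
            simp only [List.map_cons]
            congr 1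
            rw [List.zip_map_left]
            apply List.map_congr_left
            intro r _
            simp [Prod.map]
          rw [hshift, F_shift _ _ _ _ hi0]
          have hFne : F (((t.length + 1 : Nat) : Int) + b - 1)
              ((i, List.replicate h.toNat (1 : Int)) :: q'.zip (t.map (fun i => List.replicate i.toNat (1 : Int)))) ≠ [] :=
            F_ne_nil _ _ _ _
          rw [List.dropLast_cons_of_ne_nil hFne]
          rw [show ((t.length + 1 : Nat) : Int) + b - 1 = ((t.length + 1 : Nat) : Int) + (b - 1) from by ring]

-- ===== VERDICT (by name: the statement is the Claim_ definition above) =====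
theorem dropLast_replicate_zero (k : Nat) :
    (List.replicate k (0 : Int)).dropLast = List.replicate (k - 1) 0 := by
  cases k with
  | zero => rfl
  | succ k => rw [List.replicate_succ', List.dropLast_concat]; simp

theorem findOptions_spec : Claim_equal_findOptions := by
  intro pattern length _
  unfold Spec_findOptions findOptions findOptions_alt
  cases pattern with
  | nil =>
    have hc0 : ∀ X : List Int, comb X 0 = [[]] := fun X => by cases X <;> rfl
    simp only [List.length_nil, List.sum_nil, Nat.cast_zero, List.map_nil]
    rw [hc0]
    simp only [List.map_cons, List.map_nil, List.zip_nil_right]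
    have hassign : assignA (List.replicate (0 + (length - 0 - 0 + 1)).toNat [0]) ([] : List (Int × List Int))
        = List.replicate (0 + (length - 0 - 0 + 1)).toNat [0] := rfl
    rw [hassign, flatten_replicate_zero, PySem.List.slice_to_neg_one, dropLast_replicate_zero]
    congr 2
    omega
  | cons h t =>
    dsimp only
    by_cases hb : length - (h :: t).sum - ((h :: t).length : Int) + 1 < 0
    · rw [if_pos hb]
      have hshort : comb (PySem.List.pyRange 0 ((((h :: t).length : Int)) + (length - (h :: t).sum - ((h :: t).length : Int) + 1))) (h :: t).length = [] := by
        apply comb_short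
        rw [PySem.List.length_pyRange_one]
        simp only [List.length_cons] at hb ⊢
        omega
      rw [hshort]
      rfl
    · rw [if_neg hb]
      rw [not_lt] at hb
      set b : Int := length - (h :: t).sum - ((h :: t).length : Int) + 1 with hbdef
      have hrange : PySem.List.pyRange 0 (((h :: t).length : Int) + b)
          = (List.range ((h :: t).length + b.toNat)).map (fun k : Nat => (k : Int)) := by
        rw [PySem.List.pyRange_one]
        have : (((h :: t).length : Int) + b - 0).toNat = (h :: t).length + b.toNat := by omega
        rw [this]
        apply List.map_congr_left
        intro j _
        simp
      rw [hrange]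
      have hcong : ∀ p ∈ comb ((List.range ((h :: t).length + b.toNat)).map (fun k : Nat => (k : Int))) (h :: t).length,
          PySem.List.slice ((assignA (List.replicate (((h :: t).length : Int) + b).toNat [0])
              (p.zip ((h :: t).map (fun i => List.replicate i.toNat 1)))).flatten) none (some (-1))
          = (F (((h :: t).length : Int) + b) (p.zip ((h :: t).map (fun i => List.replicate i.toNat 1)))).dropLast := by
        intro p hp
        obtain ⟨hsub, hlen⟩ := comb_mem _ _ p hp
        rw [PySem.List.slice_to_neg_one]
        congr 1
        apply F_eq
        · have hp1 : p.Pairwise (· < ·) := by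
            refine List.Pairwise.sublist hsub ?_
            rw [List.pairwise_map]
            exact List.pairwise_lt_range.imp (by intro a b hab; exact_mod_cast hab)
          have hfst : (p.zip ((h :: t).map (fun i => List.replicate i.toNat (1 : Int)))).map Prod.fst = p :=
            List.map_fst_zip (by simp [hlen])
          rw [show (fun (a b : Int × List Int) => a.1 < b.1) = (fun a b => Prod.fst a < Prod.fst b) from rfl]
          rw [← List.pairwise_map (f := (Prod.fst : Int × List Int → Int)) (R := (· < ·)), hfst]
          exact hp1
        · intro q hq
          obtain ⟨a, c⟩ := q
          have ha : a ∈ p := (List.of_mem_zip hq).1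
          have := hsub.subset ha
          simp only [List.mem_map, List.mem_range] at this
          obtain ⟨j, hj, rfl⟩ := this
          constructor
          · positivity
          · have : (j : Int) < ((h :: t).length : Int) + b := by
              omega
            exact this
      rw [List.map_congr_left hcong]
      exact main_lemma ((h :: t).length + b.toNat) (h :: t) b (by simp) hb le_rfl
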